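-- pv_equiv track=rewrite | github.com/MiLk/adventofcode | 2018/day20/main.py | build_options
-- ===== SOURCE A (Python) =====
-- def build_options(line, i):
--     opts = []
--     d = 0
--     v = ''
--     while d > 0 or line[i] != ')':
--         if line[i] == '|' and d == 0:
--             opts.append(v)
--             v = ''
--         else:
--             if line[i] == '(':
--                 d += 1
--             elif line[i] == ')':
--                 d -= 1
--             v += line[i]
--         i += 1
--     opts.append(v)
--
--     return opts, i
-- ===== SOURCE B (Python) =====
-- def build_options(line, i):
--     # Pass 1: track paren depth, record indices of top-level '|' and the closing ')'.
--     j = i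
--     d = 0
--     pipes = []
--     while d > 0 or line[j] != ')':
--         c = line[j]
--         if c == '(':
--             d += 1
--         elif c == ')':
--             d -= 1
--         elif c == '|' and d == 0:
--             pipes.append(j)
--         j += 1
--     # Pass 2: split by slicing between the recorded boundaries.
--     opts = []
--     prev = i
--     for p in pipes:
--         opts.append(line[prev:p])
--         prev = p + 1
--     opts.append(line[prev:j])
--     return opts, j
-- ===== Notes on version B (the rewrite author's own statement) =====
-- stated objective: alternative
-- what changed: A accumulates each option char-by-char in a growing string inside the depth-tracked scan; B scans once recording only the indices of top-level '|' and the closing ')', then builds the options by slicing the line between those boundaries.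
-- outside the precondition, e.g. on build_options('a)bc', -1): A returns (['ca'], 1), B returns ([''], 1)
import Mathlib
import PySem

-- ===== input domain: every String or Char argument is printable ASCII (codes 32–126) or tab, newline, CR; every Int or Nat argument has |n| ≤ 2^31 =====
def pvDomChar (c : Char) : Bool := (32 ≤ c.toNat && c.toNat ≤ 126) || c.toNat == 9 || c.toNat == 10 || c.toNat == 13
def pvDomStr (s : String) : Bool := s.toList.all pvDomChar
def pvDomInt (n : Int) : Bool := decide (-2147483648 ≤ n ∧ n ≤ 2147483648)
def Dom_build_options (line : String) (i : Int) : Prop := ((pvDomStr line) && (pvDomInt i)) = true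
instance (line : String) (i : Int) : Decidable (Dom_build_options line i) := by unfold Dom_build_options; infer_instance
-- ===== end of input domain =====

-- B replaces A's char-by-char string accumulation with one index-recording scan plus slicing
-- between the recorded boundaries (objective: alternative decomposition, no speed claim).

-- ===== PORT A =====
-- the while loop of A: state (opts, d, v, i), scanning the suffix of the string from position i
def buildLoopA : List Char → List String → Int → List Char → Int → List String × Int
  | [], opts, _d, v, i => (opts ++ [String.ofList v], i)
  | c :: rest, opts, d, v, i =>
    if d > 0 ∨ c ≠ ')' then
      if c = '|' ∧ d = 0 then
        buildLoopA rest (opts ++ [String.ofList v]) d [] (i + 1)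
      else
        buildLoopA rest opts
          (if c = '(' then d + 1 else if c = ')' then d - 1 else d)
          (v ++ [c]) (i + 1)
    else (opts ++ [String.ofList v], i)

def build_options (line : String) (i : Int) : List String × Int :=
  buildLoopA (line.toList.drop i.toNat) [] 0 [] i

-- ===== PORT B =====
-- pass 1 of B: record indices of top-level '|' and stop at the top-level ')'
def scanB : List Char → Int → List Int → Int → List Int × Int
  | [], _d, pipes, j => (pipes, j)
  | c :: rest, d, pipes, j =>
    if d > 0 ∨ c ≠ ')' then
      if c = '(' then scanB rest (d + 1) pipes (j + 1)
      else if c = ')' then scanB rest (d - 1) pipes (j + 1)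
      else if c = '|' ∧ d = 0 then scanB rest d (pipes ++ [j]) (j + 1)
      else scanB rest d pipes (j + 1)
    else (pipes, j)

def build_options_alt (line : String) (i : Int) : List String × Int :=
  let r := scanB (line.toList.drop i.toNat) 0 [] i
  let f := r.1.foldl (fun (acc : List String × Int) p =>
      (acc.1 ++ [PySem.Str.slice line (some acc.2) (some p)], p + 1)) ([], i)
  (f.1 ++ [PySem.Str.slice line (some f.2) (some r.2)], r.2)

-- ===== PRECONDITION & SPEC =====
-- Pre_ excludes negative i (where Python's negative-index wraparound yields an accidental
-- value that depends on where the scan wraps) and inputs with no top-level ')' at or after i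
-- within the string, on which A raises IndexError.
def Pre_build_options (line : String) (i : Int) : Prop :=
  0 ≤ i ∧ ((List.range line.toList.length).any fun j =>
    decide (i ≤ (j : Int)) && (line.toList.getD j ' ' == ')') &&
    (((line.toList.take j).drop i.toNat).count '(' ==
     ((line.toList.take j).drop i.toNat).count ')')) = true
instance (line : String) (i : Int) : Decidable (Pre_build_options line i) := by
  unfold Pre_build_options; infer_instance
def pvWitness_build_options : String × Int := ("a|b)", 0)

def Spec_build_options (line : String) (i : Int) (out : List String × Int) : Prop := out = build_options_alt line i
instance (line : String) (i : Int) (out : List String × Int) : Decidable (Spec_build_options line i out) := by unfold Spec_build_options; infer_instance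

-- ===== CLAIM (what is proved, stated in full; the proofs are below) =====
def Claim_equal_build_options : Prop := ∀ (line : String) (i : Int), Dom_build_options line i → Pre_build_options line i → Spec_build_options line i (build_options line i)

-- ===== LEMMAS AND PROOFS =====

-- the slice B takes between two in-range boundaries is exactly the segment A accumulated
lemma str_slice_seg (line : String) (pre t : List Char) (prev : Nat)
    (h : line.toList = pre ++ t) (hp : prev ≤ pre.length) :
    PySem.Str.slice line (some (prev : Int)) (some (pre.length : Int))
      = String.ofList (pre.drop prev) := by
  apply String.ext
  rw [PySem.Str.toList_slice]
  simp only [PySem.Chars.slice_eq_listSlice, PySem.List.slice_natCast, h,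
    List.drop_append_of_le_length hp, String.toList_ofList]
  rw [List.take_append_of_le_length (by simp), List.take_of_length_le (by simp)]

-- the pipe accumulator of scanB is a pure prefix
lemma scanB_acc (t : List Char) : ∀ (d : Int) (ps : List Int) (j : Int),
    scanB t d ps j = (ps ++ (scanB t d [] j).1, (scanB t d [] j).2) := by
  induction t with
  | nil => intro d ps j; simp [scanB]
  | cons c rest ih =>
    intro d ps j
    by_cases hc : d > 0 ∨ c ≠ ')'
    · simp only [scanB, if_pos hc]
      by_cases h1 : c = '('
      · simp only [if_pos h1]; exact ih _ _ _
      · simp only [if_neg h1]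
        by_cases h2 : c = ')'
        · simp only [if_pos h2]; exact ih _ _ _
        · simp only [if_neg h2]
          by_cases h3 : c = '|' ∧ d = 0
          · simp only [if_pos h3, List.nil_append]
            rw [ih d (ps ++ [j]) (j + 1), ih d [j] (j + 1)]
            simp
          · simp only [if_neg h3]; exact ih _ _ _
    · simp [scanB, if_neg hc]

-- main loop invariant: A's running accumulation equals B's scan-then-slice assembly
lemma key (line : String) : ∀ (t pre : List Char) (prev : Nat) (d : Int) (opts : List String),
    line.toList = pre ++ t → prev ≤ pre.length →
    buildLoopA t opts d (pre.drop prev) (pre.length : Int)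
      = (let r := scanB t d [] (pre.length : Int)
         let f := r.1.foldl (fun (acc : List String × Int) p =>
            (acc.1 ++ [PySem.Str.slice line (some acc.2) (some p)], p + 1)) (opts, (prev : Int))
         (f.1 ++ [PySem.Str.slice line (some f.2) (some r.2)], r.2)) := by
  intro t
  induction t with
  | nil =>
    intro pre prev d opts h hp
    simp only [buildLoopA, scanB, List.foldl_nil]
    rw [str_slice_seg line pre [] prev h hp]
  | cons c rest ih =>
    intro pre prev d opts h hp
    have h' : line.toList = (pre ++ [c]) ++ rest := by simpa using h
    have hlen : ((pre ++ [c]).length : Int) = (pre.length : Int) + 1 := by simp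
    by_cases hc : d > 0 ∨ c ≠ ')'
    · by_cases h3 : c = '|' ∧ d = 0
      · -- top-level pipe: A flushes v, B records the index
        have hcp : ¬ c = '(' := by rintro rfl; simp at h3
        have hcr : ¬ c = ')' := by rintro rfl; simp at h3
        simp only [buildLoopA, scanB, if_pos hc, if_pos h3, if_neg hcp, if_neg hcr,
          List.nil_append]
        rw [scanB_acc rest d [(pre.length : Int)] ((pre.length : Int) + 1)]
        simp only [List.singleton_append, List.foldl_cons]
        rw [str_slice_seg line pre (c :: rest) prev h hp]
        rw [show (pre.length : Int) + 1 = (((pre ++ [c]).length : Nat) : Int) by simp]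
        have := ih (pre ++ [c]) (pre.length + 1) d
          (opts ++ [String.ofList (pre.drop prev)]) h' (by simp)
        rw [show (pre ++ [c]).drop (pre.length + 1) = [] by simp] at this
        rw [show ((pre.length + 1 : Nat) : Int) = (((pre ++ [c]).length : Nat) : Int) by simp]
          at this
        exact this
      · -- ordinary character: both update d the same way, A appends the char
        simp only [buildLoopA, scanB, if_pos hc, if_neg h3]
        have hdrop : (pre ++ [c]).drop prev = pre.drop prev ++ [c] := by
          rw [List.drop_append_of_le_length hp]
        have harg := ih (pre ++ [c]) prev
          (if c = '(' then d + 1 else if c = ')' then d - 1 else d) opts h' (by simp; omega)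
        rw [hdrop, hlen] at harg
        rw [harg]
        by_cases h1 : c = '('
        · simp [h1]
        · by_cases h2 : c = ')'
          · simp [h2]
          · have : ¬ (c = '|' ∧ d = 0) := h3
            simp [h1, h2]
    · -- stop: top-level ')'
      simp only [buildLoopA, scanB, if_neg hc, List.foldl_nil]
      rw [str_slice_seg line pre (c :: rest) prev h hp]

-- ===== VERDICT (by name: the statement is the Claim_ definition above) =====
theorem build_options_spec : Claim_equal_build_options := by
  intro line i _hdom hpre
  obtain ⟨hi, hstop⟩ := hpre
  -- from the stopping index: i < length, so i.toNat ≤ length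
  have hlt : i.toNat ≤ line.toList.length := by
    simp only [List.any_eq_true, List.mem_range, Bool.and_eq_true, decide_eq_true_eq] at hstop
    obtain ⟨j, hj, ⟨hij, _⟩, _⟩ := hstop
    omega
  have hlt' : i.toNat ≤ line.length := by rwa [String.length_toList] at hlt
  have hsplit : line.toList = line.toList.take i.toNat ++ line.toList.drop i.toNat := by simp
  have hcast : ((line.toList.take i.toNat).length : Int) = i := by
    simp only [List.length_take, String.length_toList, Nat.min_eq_left hlt']
    omega
  unfold Spec_build_options build_options build_options_alt
  have := key line (line.toList.drop i.toNat) (line.toList.take i.toNat) i.toNat 0 []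
    hsplit (by simp [hlt'])
  rw [show (line.toList.take i.toNat).drop i.toNat = [] by simp] at this
  rw [hcast] at this
  rw [show ((i.toNat : Nat) : Int) = i by omega] at this
  exact this
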